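-- pv_equiv track=rewrite | github.com/kynax/AdventOfCode | day10/part1.py | Step
-- ===== SOURCE A (Python) =====
-- def Step(s):
-- 	cur = s[0]
-- 	count = 0
-- 	ret = ""
-- 	for c in s:
-- 		if c != cur and cur != '':
-- 			ret += str(count) + cur
-- 			count = 0
-- 			cur = c
-- 		count += 1
-- 	ret += str(count) + cur
-- 	return ret
-- ===== SOURCE B (Python) =====
-- def Step(s):
--     parts = []
--     i = 0
--     n = len(s)
--     while i < n:
--         j = i
--         while j < n and s[j] == s[i]:
--             j += 1
--         parts.append(str(j - i) + s[i])
--         i = j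
--     return ''.join(parts)
-- ===== Notes on version B (the rewrite author's own statement) =====
-- stated objective: alternative
-- what changed: Replaces A's single-pass cur/count state machine with repeated string concatenation by a two-pointer scan over maximal runs that collects the encoded pieces in a list and joins them once.
import Mathlib
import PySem

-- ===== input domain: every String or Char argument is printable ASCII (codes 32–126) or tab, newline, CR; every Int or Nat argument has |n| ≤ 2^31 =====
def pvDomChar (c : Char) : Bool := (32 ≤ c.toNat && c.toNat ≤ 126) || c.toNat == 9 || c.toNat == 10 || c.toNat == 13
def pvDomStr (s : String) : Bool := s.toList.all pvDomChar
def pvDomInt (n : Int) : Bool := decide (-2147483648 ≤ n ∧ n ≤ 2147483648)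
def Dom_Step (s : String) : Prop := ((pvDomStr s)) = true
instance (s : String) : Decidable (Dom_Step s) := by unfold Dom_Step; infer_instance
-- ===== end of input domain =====

-- B replaces A's cur/count state machine (repeated concatenation) by a two-pointer
-- maximal-run scan whose encoded pieces are joined once (objective: alternative).


-- ===== PORT A =====
-- A's for-loop; `cur` is always a one-character string in Python, so the conjunct
-- `cur != ''` of A's condition is always true and `cur` is a Char here.  In the
-- then-branch A sets count = 0 and then does count += 1, hence `0 + 1`.
def stepLoop : List Char → Char → Int → List Char → List Char
  | [], cur, count, ret => ret ++ PySem.Int.toChars count ++ [cur]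
  | c :: cs, cur, count, ret =>
    if c ≠ cur then stepLoop cs c (0 + 1) (ret ++ PySem.Int.toChars count ++ [cur])
    else stepLoop cs cur (count + 1) ret

def Step (s : String) : String :=
  match PySem.Str.pyGet? s 0 with
  | none => ""          -- s[0] raises IndexError on the empty string; excluded by Pre_Step
  | some cur => String.ofList (stepLoop s.toList cur 0 [])

-- ===== PORT B =====
-- B's outer while loop: each iteration takes the maximal run of the current head
-- (B's inner `while s[j] == s[i]: j += 1`) and emits one encoded piece
def altRuns : List Char → List (List Char)
  | [] => []
  | c :: cs =>
    (PySem.Int.toChars (((c :: cs).takeWhile (· == c)).length : Int) ++ [c])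
      :: altRuns ((c :: cs).dropWhile (· == c))
termination_by l => l.length
decreasing_by
  rw [List.dropWhile_cons_of_pos (by simp)]
  exact Nat.lt_succ_of_le (List.length_dropWhile_le _ _)

def Step_alt (s : String) : String := String.ofList (altRuns s.toList).flatten

-- ===== PRECONDITION & SPEC =====
-- Pre_ excludes only the empty string, on which A raises IndexError (s[0]).
def Pre_Step (s : String) : Prop := s.toList ≠ []
instance (s : String) : Decidable (Pre_Step s) := by unfold Pre_Step; infer_instance
def pvWitness_Step : String := "aab"

def Spec_Step (s : String) (out : String) : Prop := out = Step_alt s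
instance (s : String) (out : String) : Decidable (Spec_Step s out) := by unfold Spec_Step; infer_instance

-- ===== CLAIM (what is proved, stated in full; the proofs are below) =====
def Claim_equal_Step : Prop := ∀ (s : String), Dom_Step s → Pre_Step s → Spec_Step s (Step s)

-- ===== LEMMAS AND PROOFS =====

lemma altRuns_nil : altRuns [] = [] := by simp [altRuns]

lemma altRuns_cons (c : Char) (cs : List Char) :
    altRuns (c :: cs) =
      (PySem.Int.toChars (((c :: cs).takeWhile (· == c)).length : Int) ++ [c])
        :: altRuns ((c :: cs).dropWhile (· == c)) := by
  simp [altRuns]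

-- invariant of A's loop: it finishes the current run (count so far + the pending
-- equal prefix of l), emits it, and then agrees with B's run decomposition
lemma stepLoop_eq (l : List Char) : ∀ (cur : Char) (count : Int) (ret : List Char),
    stepLoop l cur count ret =
      ret ++ PySem.Int.toChars (count + ((l.takeWhile (· == cur)).length : Int)) ++ [cur]
        ++ (altRuns (l.dropWhile (· == cur))).flatten := by
  induction l with
  | nil => intro cur count ret; simp [stepLoop, altRuns_nil]
  | cons c cs ih =>
    intro cur count ret
    by_cases h : c = cur
    · subst h
      rw [show stepLoop (c :: cs) c count ret = stepLoop cs c (count + 1) ret from by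
        simp [stepLoop]]
      rw [ih]
      rw [List.takeWhile_cons_of_pos (by simp), List.dropWhile_cons_of_pos (by simp)]
      congr 3
      simp only [List.length_cons]
      congr 1
      push_cast; ring
    · rw [show stepLoop (c :: cs) cur count ret =
          stepLoop cs c (0 + 1) (ret ++ PySem.Int.toChars count ++ [cur]) from by
        simp [stepLoop, h]]
      rw [ih]
      rw [List.takeWhile_cons_of_neg (by simpa using h),
        List.dropWhile_cons_of_neg (by simpa using h), altRuns_cons]
      rw [List.takeWhile_cons_of_pos (by simp), List.dropWhile_cons_of_pos (by simp)]
      simp only [List.flatten_cons, List.length_nil, List.length_cons,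
        Int.natCast_zero, add_zero]
      rw [show ((0 : Int) + 1 + ((cs.takeWhile (· == c)).length : Int)) =
          (((cs.takeWhile (· == c)).length + 1 : Nat) : Int) from by push_cast; ring]
      simp [List.append_assoc]

-- ===== VERDICT (by name: the statement is the Claim_ definition above) =====
theorem Step_spec : Claim_equal_Step := by
  intro s _ hpre
  unfold Spec_Step Step Step_alt
  obtain ⟨c, cs, hl⟩ := List.exists_cons_of_ne_nil hpre
  rw [show PySem.Str.pyGet? s 0 = some c from by
    simp [PySem.Str.pyGet?, hl]]
  show String.ofList (stepLoop s.toList c 0 []) = String.ofList (altRuns s.toList).flatten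
  rw [hl, stepLoop_eq, altRuns_cons]
  rw [List.dropWhile_cons_of_pos (by simp)]
  simp [List.flatten_cons, List.append_assoc]
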